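-- pv_equiv track=rewrite | github.com/gridu/PYTHON-BASIC | practice/1_python_part_1/task4.py | calculate_power_with_difference
-- ===== SOURCE A (Python) =====
-- from typing import List
--
-- def calculate_power_with_difference(ints: List[int]) -> List[int]:
--     powers = []
--     previous_difference = [0]
--     result = []
--
--     for number in ints:
--         powers.append(number**2)
--
--     for index, number in enumerate(ints[:-1]):
--         previous_difference.append(powers[index] - number)
--
--     zipped = zip(powers, previous_difference)
--     for powers, previous_difference in zipped:
--         result.append(powers - previous_difference)
--
--     return result
-- ===== SOURCE B (Python) =====
-- def calculate_power_with_difference(ints):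
--     if not ints:
--         return []
--     result = [ints[0] ** 2]
--     prev = ints[0]
--     for number in ints[1:]:
--         result.append(number ** 2 - prev ** 2 + prev)
--         prev = number
--     return result
-- ===== Notes on version B (the rewrite author's own statement) =====
-- stated objective: simpler
-- what changed: Replaces A's three sequential passes (building a powers table, a shifted previous_difference table, then zipping and subtracting) with a single direct traversal that keeps only the previous element and emits each output from the recurrence n**2 - prev**2 + prev.
import Mathlib
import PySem

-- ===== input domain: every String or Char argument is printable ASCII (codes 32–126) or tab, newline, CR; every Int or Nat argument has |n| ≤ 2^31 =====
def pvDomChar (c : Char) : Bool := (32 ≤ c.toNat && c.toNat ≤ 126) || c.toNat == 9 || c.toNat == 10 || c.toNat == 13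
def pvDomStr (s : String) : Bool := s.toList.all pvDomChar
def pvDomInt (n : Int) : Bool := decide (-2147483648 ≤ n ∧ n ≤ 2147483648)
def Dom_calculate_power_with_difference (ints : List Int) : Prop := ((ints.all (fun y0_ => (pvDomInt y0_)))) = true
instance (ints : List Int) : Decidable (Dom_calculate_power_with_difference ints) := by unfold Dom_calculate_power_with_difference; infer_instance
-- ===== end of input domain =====

-- B replaces A's three passes and two intermediate lists by one single-pass recurrence; objective: simpler.

-- ===== PORT A =====
-- powers[index] in the second loop is always in range (index < len(ints) - 1),
-- so pyGetD with default 0 is exact here.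
def calculate_power_with_difference (ints : List Int) : List Int :=
  let powers := ints.foldl (fun acc number => acc ++ [number ^ 2]) []
  let previous_difference :=
    (PySem.List.enumerate (PySem.List.slice ints none (some (-1))) 0).foldl
      (fun acc p => acc ++ [PySem.List.pyGetD powers p.1 0 - p.2]) [0]
  (powers.zip previous_difference).foldl (fun acc p => acc ++ [p.1 - p.2]) []

-- ===== PORT B =====
def pvGo (prev : Int) : List Int → List Int
  | [] => []
  | n :: t => (n ^ 2 - prev ^ 2 + prev) :: pvGo n t

def calculate_power_with_difference_alt (ints : List Int) : List Int :=
  match ints with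
  | [] => []
  | x :: xs => x ^ 2 :: pvGo x xs

-- ===== PRECONDITION & SPEC =====
def Spec_calculate_power_with_difference (ints : List Int) (out : List Int) : Prop := out = calculate_power_with_difference_alt ints
instance (ints : List Int) (out : List Int) : Decidable (Spec_calculate_power_with_difference ints out) := by unfold Spec_calculate_power_with_difference; infer_instance

-- ===== CLAIM (what is proved, stated in full; the proofs are below) =====
def Claim_equal_calculate_power_with_difference : Prop := ∀ (ints : List Int), Dom_calculate_power_with_difference ints → Spec_calculate_power_with_difference ints (calculate_power_with_difference ints)

-- ===== LEMMAS AND PROOFS =====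

-- the previous_difference loop emits n² - n for each element n of ints[:-1]
theorem pv_pd_eq (ints : List Int) :
    (PySem.List.enumerate ints.dropLast 0).map
      (fun p => PySem.List.pyGetD (ints.map (fun n => n ^ 2)) p.1 0 - p.2)
    = ints.dropLast.map (fun n => n ^ 2 - n) := by
  apply List.ext_getElem?
  intro k
  rcases Nat.lt_or_ge k ints.dropLast.length with hk | hk
  · have hk' : k < ints.length := lt_of_lt_of_le hk (by simp)
    have hpy : PySem.List.pyGetD (ints.map (fun n => n ^ 2)) (k : Int) 0 = ints[k] ^ 2 := by
      rw [PySem.List.pyGetD_natCast]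
      simp [List.getD_eq_getElem?_getD, List.getElem?_eq_getElem hk']
    simp only [List.getElem?_map, PySem.List.getElem?_enumerate, List.getElem?_eq_getElem hk]
    simp [List.getElem_dropLast, hpy]
  · simp only [List.getElem?_map, PySem.List.getElem?_enumerate, List.getElem?_eq_none hk]
    simp

theorem pv_zip_eq (xs : List Int) (x : Int) :
    ((xs.map (fun n => n ^ 2)).zip ((x :: xs).dropLast.map (fun n => n ^ 2 - n))).map
      (fun p => p.1 - p.2)
    = pvGo x xs := by
  induction xs generalizing x with
  | nil => simp [pvGo]
  | cons n t ih =>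
    have hd : (x :: n :: t).dropLast = x :: (n :: t).dropLast := by
      simp [List.dropLast_cons_of_ne_nil]
    rw [hd]
    simp only [List.map_cons, List.zip_cons_cons, pvGo]
    exact congrArg₂ List.cons (by ring) (ih n)

-- ===== VERDICT (by name: the statement is the Claim_ definition above) =====
theorem calculate_power_with_difference_spec : Claim_equal_calculate_power_with_difference := by
  intro ints _
  unfold Spec_calculate_power_with_difference calculate_power_with_difference calculate_power_with_difference_alt
  simp only [PySem.List.foldl_append_singleton_eq_map, List.nil_append, List.singleton_append,
    PySem.List.slice_to_neg_one]
  rw [pv_pd_eq]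
  cases ints with
  | nil => simp
  | cons x xs =>
    simp only [List.map_cons, List.zip_cons_cons, List.map_cons]
    exact congrArg₂ List.cons (by ring) (pv_zip_eq xs x)
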